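-- pv_equiv track=rewrite | github.com/relaernu/sudoku | sudoku.py | LogicAnd
-- ===== SOURCE A (Python) =====
-- def LogicAnd(list1, list2):
--     list1.sort()
--     list2.sort()
--     andset = []
--     for l1 in list1:
--         if l1 != 0:
--             for l2 in list2:
--                 if l2 != 0:
--                     if l2 == l1:
--                         andset.append(l2)
--                         break
--     return andset
-- ===== SOURCE B (Python) =====
-- def LogicAnd(list1, list2):
--     list1.sort()
--     list2.sort()
--     out = []
--     i = 0
--     j = 0
--     while i < len(list1) and j < len(list2):
--         a = list1[i]
--         b = list2[j]
--         if a == 0: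
--             i += 1
--         elif b == 0:
--             j += 1
--         elif a == b:
--             out.append(a)
--             i += 1
--         elif a < b:
--             i += 1
--         else:
--             j += 1
--     return out
-- ===== Notes on version B (the rewrite author's own statement) =====
-- stated objective: faster
-- what changed: Replaced the nested membership scan over list2 for each element of list1 by a single two-pointer merge over the two sorted lists.
import Mathlib
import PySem

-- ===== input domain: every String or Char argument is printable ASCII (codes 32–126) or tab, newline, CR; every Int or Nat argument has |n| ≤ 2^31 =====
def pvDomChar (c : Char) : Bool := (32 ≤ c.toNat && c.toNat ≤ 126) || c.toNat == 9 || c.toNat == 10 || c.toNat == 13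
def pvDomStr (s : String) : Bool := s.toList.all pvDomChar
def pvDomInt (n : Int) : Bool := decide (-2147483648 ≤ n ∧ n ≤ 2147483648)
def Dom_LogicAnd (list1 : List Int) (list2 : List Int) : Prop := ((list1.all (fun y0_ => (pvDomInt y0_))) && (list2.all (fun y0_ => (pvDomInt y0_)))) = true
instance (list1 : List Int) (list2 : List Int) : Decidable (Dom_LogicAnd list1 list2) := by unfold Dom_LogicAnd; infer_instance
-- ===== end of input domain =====

-- B replaces A's nested scan by a two-pointer merge of the two sorted lists (faster in a timing run).
-- Both A and B sort list1 and list2 in place; the equivalence proved here is about the return value.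

-- ===== PORT A =====
-- inner 'for l2 in list2: …' loop with its break, for one fixed l1
def pvInnerA (l1 : Int) : List Int → List Int → List Int
  | [], acc => acc
  | l2 :: rest, acc =>
      if l2 ≠ 0 then
        (if l2 = l1 then acc ++ [l2] else pvInnerA l1 rest acc)
      else pvInnerA l1 rest acc

-- outer 'for l1 in list1' loop, carrying andset
def pvOuterA : List Int → List Int → List Int → List Int
  | [], _, acc => acc
  | l1 :: rest, l2s, acc =>
      if l1 ≠ 0 then pvOuterA rest l2s (pvInnerA l1 l2s acc)
      else pvOuterA rest l2s acc

def LogicAnd (list1 : List Int) (list2 : List Int) : List Int :=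
  let s1 := PySem.List.sorted list1 (fun x => x) false
  let s2 := PySem.List.sorted list2 (fun x => x) false
  pvOuterA s1 s2 []

-- ===== PORT B =====
-- the while loop: i/j cursors become the unconsumed suffixes of the two sorted lists
def pvMergeB : List Int → List Int → List Int → List Int
  | [], _, out => out
  | _ :: _, [], out => out
  | a :: as_, b :: bs, out =>
      if a = 0 then pvMergeB as_ (b :: bs) out
      else if b = 0 then pvMergeB (a :: as_) bs out
      else if a = b then pvMergeB as_ (b :: bs) (out ++ [a])
      else if a < b then pvMergeB as_ (b :: bs) out
      else pvMergeB (a :: as_) bs out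
  termination_by l1 l2 => l1.length + l2.length

def LogicAnd_alt (list1 : List Int) (list2 : List Int) : List Int :=
  let s1 := PySem.List.sorted list1 (fun x => x) false
  let s2 := PySem.List.sorted list2 (fun x => x) false
  pvMergeB s1 s2 []

-- ===== PRECONDITION & SPEC =====
def Spec_LogicAnd (list1 : List Int) (list2 : List Int) (out : List Int) : Prop := out = LogicAnd_alt list1 list2
instance (list1 : List Int) (list2 : List Int) (out : List Int) : Decidable (Spec_LogicAnd list1 list2 out) := by unfold Spec_LogicAnd; infer_instance

-- ===== CLAIM (what is proved, stated in full; the proofs are below) =====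
def Claim_equal_LogicAnd : Prop := ∀ (list1 : List Int) (list2 : List Int), Dom_LogicAnd list1 list2 → Spec_LogicAnd list1 list2 (LogicAnd list1 list2)

-- ===== LEMMAS AND PROOFS =====

def pvPred (l2s : List Int) (x : Int) : Bool := (x ≠ 0) && (x ∈ l2s)

-- A's inner loop appends l1 exactly when l1 (≠ 0) occurs in l2s
theorem pvInnerA_eq (l1 : Int) (h1 : l1 ≠ 0) (l2s acc : List Int) :
    pvInnerA l1 l2s acc = if l1 ∈ l2s then acc ++ [l1] else acc := by
  induction l2s with
  | nil => simp [pvInnerA]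
  | cons l2 rest ih =>
    by_cases h2 : l2 = 0
    · subst h2
      simp [pvInnerA, ih, List.mem_cons, h1]
    · by_cases he : l2 = l1
      · subst he
        simp [pvInnerA, h2, List.mem_cons]
      · have hne : l1 ≠ l2 := fun h => he h.symm
        simp [pvInnerA, h2, he, ih, List.mem_cons, hne]

theorem pvOuterA_eq (l1s l2s acc : List Int) :
    pvOuterA l1s l2s acc = acc ++ l1s.filter (pvPred l2s) := by
  induction l1s generalizing acc with
  | nil => simp [pvOuterA]
  | cons x rest ih =>
    by_cases hx : x = 0
    · subst hx; simp [pvOuterA, ih, pvPred]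
    · rw [pvOuterA]
      simp only [hx, ne_eq, not_false_eq_true, if_true]
      rw [ih, pvInnerA_eq x hx]
      by_cases hm : x ∈ l2s
      · simp [hm, pvPred, hx]
      · simp [hm, pvPred, hx]

-- B's merge, on sorted inputs, computes the same filter
theorem pvMergeB_eq : ∀ (l1s l2s out : List Int),
    l1s.Pairwise (· ≤ ·) → l2s.Pairwise (· ≤ ·) →
    pvMergeB l1s l2s out = out ++ l1s.filter (pvPred l2s) := by
  intro l1s l2s out
  induction l1s, l2s, out using pvMergeB.induct with
  | case1 x out =>
    intro _ _
    simp [pvMergeB]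
  | case2 head tail out =>
    intro _ _
    simp [pvMergeB, pvPred]
  | case3 as_ b bs out ih =>
    intro h1 h2
    rw [pvMergeB]
    simp [ih h1.of_cons h2, pvPred]
  | case4 a as_ bs out ha ih =>
    intro h1 h2
    have e : pvMergeB (a :: as_) (0 :: bs) out = pvMergeB (a :: as_) bs out := by
      rw [pvMergeB]; simp [ha]
    rw [e, ih h1 h2.of_cons]
    congr 1
    apply List.filter_congr
    intro x _
    by_cases hx0 : x = 0
    · simp [pvPred, hx0]
    · simp [pvPred, hx0, List.mem_cons]
  | case5 as_ b bs out hb _ ih =>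
    intro h1 h2
    have e : pvMergeB (b :: as_) (b :: bs) out = pvMergeB as_ (b :: bs) (out ++ [b]) := by
      rw [pvMergeB]; simp [hb]
    rw [e, ih h1.of_cons h2, List.filter_cons]
    simp [pvPred, hb]
  | case6 a as_ b bs out ha hb hab hlt ih =>
    intro h1 h2
    have e : pvMergeB (a :: as_) (b :: bs) out = pvMergeB as_ (b :: bs) out := by
      rw [pvMergeB]; simp [ha, hb, hab, hlt]
    rw [e, ih h1.of_cons h2, List.filter_cons]
    have hna : a ∉ b :: bs := by
      intro hmem
      rcases List.mem_cons.mp hmem with h | h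
      · exact hab h
      · have := (List.pairwise_cons.mp h2).1 a h
        omega
    simp [pvPred, hna]
  | case7 a as_ b bs out ha hb hab hlt ih =>
    intro h1 h2
    have e : pvMergeB (a :: as_) (b :: bs) out = pvMergeB (a :: as_) bs out := by
      rw [pvMergeB]; simp [ha, hb, hab, hlt]
    rw [e, ih h1 h2.of_cons]
    congr 1
    apply List.filter_congr
    intro x hx
    have hax : a ≤ x := by
      rcases List.mem_cons.mp hx with h | h
      · omega
      · exact (List.pairwise_cons.mp h1).1 x h
    have hxb : x ≠ b := by omega
    by_cases hx0 : x = 0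
    · simp [pvPred, hx0]
    · simp [pvPred, hx0, List.mem_cons, hxb]

-- ===== VERDICT (by name: the statement is the Claim_ definition above) =====
theorem LogicAnd_spec : Claim_equal_LogicAnd := by
  intro list1 list2 _
  unfold Spec_LogicAnd LogicAnd LogicAnd_alt
  rw [pvOuterA_eq, pvMergeB_eq _ _ _
    (PySem.List.sorted_pairwise list1 (fun x => x))
    (PySem.List.sorted_pairwise list2 (fun x => x))]
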